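-- pv_equiv track=rewrite | github.com/viktoriaDEVV/AOIS | lab5/digital_machine.py | subtraction
-- ===== SOURCE A (Python) =====
-- def subtraction(binary_number):
--     result_number = []
--     carry = 1
--     for bit in reversed(binary_number):
--         if bit == '1' and carry == 1:
--             result_number.append('0')
--             carry = 0
--         elif bit == '0' and carry == 1:
--             result_number.append('1')
--             carry = 1
--         else:
--             result_number.append(bit)
--     return ''.join(reversed(result_number))
-- ===== SOURCE B (Python) =====
-- def subtraction(binary_number):
--     # Locate the rightmost '1'; it becomes '0' and every '0' after it becomes '1'.
--     idx = binary_number.rfind('1')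
--     fill = ''.join('1' if c == '0' else c for c in binary_number[idx + 1:])
--     if idx == -1:
--         return fill
--     return binary_number[:idx] + '0' + fill
-- ===== Notes on version B (the rewrite author's own statement) =====
-- stated objective: alternative
-- what changed: Replaces A's stateful right-to-left borrow loop (carry flag, append, final reverse) with an rfind of the rightmost set bit followed by slicing: prefix kept verbatim, that bit cleared, zero bits in the suffix flipped to one.
import Mathlib
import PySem

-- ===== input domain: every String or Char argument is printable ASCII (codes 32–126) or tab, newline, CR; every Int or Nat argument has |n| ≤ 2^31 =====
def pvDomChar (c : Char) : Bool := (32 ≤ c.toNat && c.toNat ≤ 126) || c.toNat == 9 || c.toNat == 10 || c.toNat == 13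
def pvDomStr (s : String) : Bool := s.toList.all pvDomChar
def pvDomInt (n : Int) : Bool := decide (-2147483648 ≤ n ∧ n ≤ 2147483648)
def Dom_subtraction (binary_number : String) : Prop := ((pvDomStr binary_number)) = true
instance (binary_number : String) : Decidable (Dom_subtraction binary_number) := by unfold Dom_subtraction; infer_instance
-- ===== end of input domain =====

-- B replaces A's stateful right-to-left borrow loop with an rfind of the rightmost set bit plus slice/flip of the suffix; same cost (objective: alternative).

-- ===== PORT A =====
-- one loop step: "if bit == '1' and carry == 1: … elif bit == '0' and carry == 1: … else: …"
def stepA (st : List Char × Nat) (bit : Char) : List Char × Nat :=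
  if bit = '1' ∧ st.2 = 1 then (st.1 ++ ['0'], 0)
  else if bit = '0' ∧ st.2 = 1 then (st.1 ++ ['1'], 1)
  else (st.1 ++ [bit], st.2)

def subtraction (binary_number : String) : String :=
  let r := binary_number.toList.reverse.foldl stepA ([], 1)
  String.ofList r.1.reverse

-- ===== PORT B =====
def pyFlip (c : Char) : Char := if c = '0' then '1' else c   -- "'1' if c == '0' else c"

def subtraction_alt (binary_number : String) : String :=
  let idx := PySem.Str.rfind binary_number "1"
  let fill := String.ofList ((PySem.List.slice binary_number.toList (some (idx + 1)) none).map pyFlip)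
  if idx = -1 then fill
  else String.ofList (PySem.List.slice binary_number.toList none (some idx)) ++ "0" ++ fill

-- ===== PRECONDITION & SPEC =====
def Spec_subtraction (binary_number : String) (out : String) : Prop := out = subtraction_alt binary_number
instance (binary_number : String) (out : String) : Decidable (Spec_subtraction binary_number out) := by unfold Spec_subtraction; infer_instance

-- ===== CLAIM (what is proved, stated in full; the proofs are below) =====
def Claim_equal_subtraction : Prop := ∀ (binary_number : String), Dom_subtraction binary_number → Spec_subtraction binary_number (subtraction binary_number)

-- ===== LEMMAS AND PROOFS =====

-- right-to-left decrement on the REVERSED character list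
def decR : List Char → List Char
  | [] => []
  | c :: t => if c = '1' then '0' :: t else pyFlip c :: decR t

-- left-to-right decrement on the original character list (common spec)
def decL : List Char → List Char
  | [] => []
  | c :: t =>
      if '1' ∈ t then c :: decL t
      else if c = '1' then '0' :: t.map pyFlip
      else pyFlip c :: decL t

lemma foldl_carry0 (rl : List Char) : ∀ acc, rl.foldl stepA (acc, 0) = (acc ++ rl, 0) := by
  induction rl with
  | nil => simp
  | cons c t ih => intro acc; simp [stepA, ih]

lemma foldl_carry1 (rl : List Char) :
    ∀ acc, rl.foldl stepA (acc, 1) = (acc ++ decR rl, if '1' ∈ rl then 0 else 1) := by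
  induction rl with
  | nil => simp [decR]
  | cons c t ih =>
    intro acc
    by_cases h1 : c = '1'
    · subst h1
      simp [stepA, decR, foldl_carry0]
    · have h1' : ('1':Char) ≠ c := fun h => h1 h.symm
      by_cases h0 : c = '0'
      · subst h0
        simp [stepA, decR, pyFlip, ih, h1']
      · simp [stepA, decR, pyFlip, h1, h1', h0, ih]

lemma decR_append (xs ys : List Char) :
    decR (xs ++ ys) = if '1' ∈ xs then decR xs ++ ys else xs.map pyFlip ++ decR ys := by
  induction xs with
  | nil => simp
  | cons c t ih =>
    by_cases h1 : c = '1'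
    · subst h1; simp [decR]
    · have h1' : ('1':Char) ≠ c := fun h => h1 h.symm
      simp [decR, h1, h1', ih]
      by_cases ht : '1' ∈ t <;> simp [ht]

lemma decL_no_one (l : List Char) (h : '1' ∉ l) : decL l = l.map pyFlip := by
  induction l with
  | nil => simp [decL]
  | cons c t ih =>
    simp only [List.mem_cons, not_or] at h
    have hc : ¬ c = '1' := fun hc => h.1 hc.symm
    simp [decL, h.2, hc, ih h.2]

lemma A_eq_decL (l : List Char) : (decR l.reverse).reverse = decL l := by
  induction l with
  | nil => simp [decR, decL]
  | cons c t ih =>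
    simp only [List.reverse_cons]
    rw [decR_append]
    by_cases ht : '1' ∈ t
    · simp [ht, decL, ih]
    · by_cases h1 : c = '1'
      · subst h1; simp [ht, decR, decL]
      · simp [ht, decR, decL, h1, decL_no_one t ht]

-- rfind '1' characterization
lemma go_shift (c : Char) (t : List Char) :
    ∀ k, PySem.Chars.rfind.go (c :: t) ['1'] (k + 1) =
      if PySem.Chars.rfind.go t ['1'] k = -1
      then (if c = '1' then (0 : Int) else -1)
      else PySem.Chars.rfind.go t ['1'] k + 1 := by
  intro k
  induction k with
  | zero =>
    by_cases hp : ['1'].isPrefixOf t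
    · simp [PySem.Chars.rfind.go, hp]
    · by_cases hc : c = '1'
      · subst hc; simp [PySem.Chars.rfind.go, hp, List.isPrefixOf]
      · have h1' : ¬ ('1':Char) = c := fun h => hc h.symm
        simp [PySem.Chars.rfind.go, hp, List.isPrefixOf, h1', hc]
  | succ k ih =>
    have hdrop : (c :: t).drop (k + 2) = t.drop (k + 1) := by simp
    by_cases hp : ['1'].isPrefixOf (t.drop (k + 1))
    · simp [PySem.Chars.rfind.go, hdrop, hp]
      omega
    · simp [PySem.Chars.rfind.go, hdrop, hp] at ih ⊢
      exact ih

lemma rfind_cons (c : Char) (t : List Char) :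
    PySem.Chars.rfind (c :: t) ['1'] =
      if PySem.Chars.rfind t ['1'] = -1
      then (if c = '1' then (0 : Int) else -1)
      else PySem.Chars.rfind t ['1'] + 1 := by
  simpa [PySem.Chars.rfind] using go_shift c t t.length

lemma rfind_ge (l : List Char) : -1 ≤ PySem.Chars.rfind l ['1'] := by
  induction l with
  | nil => simp [PySem.Chars.rfind, PySem.Chars.rfind.go, List.isPrefixOf]
  | cons c t ih => rw [rfind_cons]; split_ifs <;> omega

lemma rfind_neg_iff (l : List Char) : PySem.Chars.rfind l ['1'] = -1 ↔ '1' ∉ l := by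
  induction l with
  | nil => simp [PySem.Chars.rfind, PySem.Chars.rfind.go, List.isPrefixOf]
  | cons c t ih =>
    rw [rfind_cons]
    by_cases h : PySem.Chars.rfind t ['1'] = -1
    · have ht : '1' ∉ t := ih.mp h
      simp [h, ht]
      by_cases h1 : c = '1' <;> simp [h1, eq_comm]
    · have := rfind_ge t
      have ht : '1' ∈ t := by
        by_contra hmem; exact h (ih.mpr hmem)
      simp [h, ht]
      omega

-- B's result as a list computation
def Bcore (l : List Char) : List Char :=
  let idx := PySem.Chars.rfind l ['1']
  let fill := (PySem.List.slice l (some (idx + 1)) none).map pyFlip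
  if idx = -1 then fill else PySem.List.slice l none (some idx) ++ '0' :: fill

lemma B_eq_decL (l : List Char) : Bcore l = decL l := by
  induction l with
  | nil => decide
  | cons c t ih =>
    by_cases ht : '1' ∈ t
    · have hne : PySem.Chars.rfind t ['1'] ≠ -1 := by
        intro h; exact ((rfind_neg_iff t).mp h) ht
      have hge : 0 ≤ PySem.Chars.rfind t ['1'] := by have := rfind_ge t; omega
      obtain ⟨n, hn⟩ : ∃ n : Nat, PySem.Chars.rfind t ['1'] = (n : Int) :=
        ⟨(PySem.Chars.rfind t ['1']).toNat, (Int.toNat_of_nonneg hge).symm⟩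
      have hcons : PySem.Chars.rfind (c :: t) ['1'] = (n : Int) + 1 := by
        rw [rfind_cons]; simp [hn]
      have h1 : ((n : Int) + 1).toNat = n + 1 := by omega
      have h2 : ((n : Int) + 1 + 1).toNat = n + 2 := by omega
      have h3 : ((n : Int) + 1).toNat = n + 1 := h1
      rw [decL, if_pos ht, ← ih]
      simp only [Bcore, hcons, hn]
      rw [if_neg (by omega), if_neg (by rw [hn] at hne; exact hne)]
      have e2 : ((n : Int) + 1 + 1) = (((n + 2 : Nat) : Int)) := by push_cast; ring
      have e1 : ((n : Int) + 1) = (((n + 1 : Nat) : Int)) := by push_cast; ring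
      rw [e2, e1, PySem.List.slice_to_natCast, PySem.List.slice_to_natCast,
        PySem.List.slice_from_natCast, PySem.List.slice_from_natCast]
      simp
    · by_cases h1 : c = '1'
      · subst h1
        have hrt : PySem.Chars.rfind t ['1'] = -1 := (rfind_neg_iff t).mpr ht
        have hcons : PySem.Chars.rfind ('1' :: t) ['1'] = 0 := by
          rw [rfind_cons]; simp [hrt]
        simp only [Bcore, hcons]
        rw [if_neg (by omega), show (0 : Int) + 1 = 1 by ring,
          PySem.List.slice_to ('1' :: t) (by omega : (0:Int) ≤ 0),
          PySem.List.slice_from_one]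
        simp [decL, ht]
      · have hrt : PySem.Chars.rfind t ['1'] = -1 := (rfind_neg_iff t).mpr ht
        have hcons : PySem.Chars.rfind (c :: t) ['1'] = -1 := by
          rw [rfind_cons]; simp [hrt, h1]
        simp only [Bcore, hcons]
        rw [show (-1 : Int) + 1 = 0 by ring, PySem.List.slice_zero_start,
          PySem.List.slice_none_none]
        simp [decL, ht, h1, decL_no_one t ht, pyFlip]

lemma alt_toList (s : String) : (subtraction_alt s).toList = Bcore s.toList := by
  simp only [subtraction_alt, Bcore, PySem.Str.rfind]
  have : ("1" : String).toList = ['1'] := rfl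
  rw [this]
  split_ifs with h <;> simp

theorem subtraction_spec : Claim_equal_subtraction := by
  intro s _
  unfold Spec_subtraction
  have hA : (subtraction s).toList = decL s.toList := by
    simp only [subtraction, foldl_carry1 s.toList.reverse []]
    simp [A_eq_decL]
  have hB : (subtraction_alt s).toList = decL s.toList := by
    rw [alt_toList, B_eq_decL]
  have : (subtraction s).toList = (subtraction_alt s).toList := hA.trans hB.symm
  exact String.ext (by simpa [String.toList] using this)
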